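-- pv_equiv track=rewrite | github.com/that-in-rust/knight-bus-graph-walker | benchmarks/walk_hopper_v1/common.py | build_layer_ranges_now
-- ===== SOURCE A (Python) =====
-- def build_layer_ranges_now(node_count: int, layer_count: int) -> list[tuple[int, int]]:
--     if node_count <= 0:
--         raise ValueError("node_count must be positive")
--     if layer_count <= 1:
--         raise ValueError("layer_count must be at least 2")
--     layer_count = min(layer_count, node_count)
--     base_size = node_count // layer_count
--     remainder = node_count % layer_count
--     ranges: list[tuple[int, int]] = []
--     next_start = 0
--     for layer_index in range(layer_count):
--         layer_size = base_size + (1 if layer_index < remainder else 0)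
--         next_end = next_start + layer_size
--         ranges.append((next_start, next_end))
--         next_start = next_end
--     return ranges
-- ===== SOURCE B (Python) =====
-- def build_layer_ranges_now(node_count: int, layer_count: int) -> list[tuple[int, int]]:
--     if node_count <= 0:
--         raise ValueError("node_count must be positive")
--     if layer_count <= 1:
--         raise ValueError("layer_count must be at least 2")
--     layer_count = min(layer_count, node_count)
--     base_size = node_count // layer_count
--     remainder = node_count % layer_count
--     return [
--         (i * base_size + min(i, remainder), (i + 1) * base_size + min(i + 1, remainder))
--         for i in range(layer_count)
--     ]
-- ===== Notes on version B (the rewrite author's own statement) =====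
-- stated objective: alternative
-- what changed: Replaced the accumulating loop carrying next_start with a stateless closed-form comprehension computing each layer's boundaries directly as i*base_size + min(i, remainder).
import Mathlib
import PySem

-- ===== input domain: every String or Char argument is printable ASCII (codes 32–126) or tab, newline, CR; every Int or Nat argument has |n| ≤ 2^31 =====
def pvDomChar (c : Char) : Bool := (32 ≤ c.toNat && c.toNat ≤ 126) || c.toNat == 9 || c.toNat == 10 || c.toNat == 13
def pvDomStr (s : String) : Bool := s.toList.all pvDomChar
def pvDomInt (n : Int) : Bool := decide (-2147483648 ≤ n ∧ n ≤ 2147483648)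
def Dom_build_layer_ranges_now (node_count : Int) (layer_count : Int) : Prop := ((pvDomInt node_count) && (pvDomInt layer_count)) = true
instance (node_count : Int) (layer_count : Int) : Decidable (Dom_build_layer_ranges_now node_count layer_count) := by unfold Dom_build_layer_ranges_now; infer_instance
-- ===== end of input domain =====

-- B replaces A's accumulating loop with a stateless closed-form comprehension (same cost);
-- both raise on node_count <= 0 or layer_count <= 1, which Pre_ excludes.

-- ===== PORT A =====
-- literal port of A: the guard branches (where Python raises, excluded by Pre_) return [],
-- then a foldl over range(layer_count) carrying (ranges, next_start)
def build_layer_ranges_now (node_count : Int) (layer_count : Int) : List (Int × Int) :=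
  if node_count ≤ 0 then []            -- raise ValueError("node_count must be positive")
  else if layer_count ≤ 1 then []      -- raise ValueError("layer_count must be at least 2")
  else
    let lc := min layer_count node_count
    let base_size := PySem.Int.floordiv node_count lc
    let remainder := PySem.Int.mod node_count lc
    let st := (PySem.List.pyRange 0 lc 1).foldl
      (fun (st : List (Int × Int) × Int) layer_index =>
        let layer_size := base_size + (if layer_index < remainder then (1:Int) else 0)
        let next_end := st.2 + layer_size
        (st.1 ++ [(st.2, next_end)], next_end))
      ([], 0)
    st.1

-- ===== PORT B =====
def build_layer_ranges_now_alt (node_count : Int) (layer_count : Int) : List (Int × Int) :=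
  if node_count ≤ 0 then []            -- raise ValueError("node_count must be positive")
  else if layer_count ≤ 1 then []      -- raise ValueError("layer_count must be at least 2")
  else
    let lc := min layer_count node_count
    let base_size := PySem.Int.floordiv node_count lc
    let remainder := PySem.Int.mod node_count lc
    (PySem.List.pyRange 0 lc 1).map (fun i =>
      (i * base_size + min i remainder, (i + 1) * base_size + min (i + 1) remainder))

-- ===== PRECONDITION & SPEC =====
-- Pre_ excludes exactly the inputs where Python A raises ValueError (node_count <= 0 or layer_count <= 1)
def Pre_build_layer_ranges_now (node_count : Int) (layer_count : Int) : Prop :=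
  0 < node_count ∧ 1 < layer_count
instance (node_count : Int) (layer_count : Int) : Decidable (Pre_build_layer_ranges_now node_count layer_count) := by unfold Pre_build_layer_ranges_now; infer_instance

def pvWitness_build_layer_ranges_now : Int × Int := (10, 3)

def Spec_build_layer_ranges_now (node_count : Int) (layer_count : Int) (out : List (Int × Int)) : Prop := out = build_layer_ranges_now_alt node_count layer_count
instance (node_count : Int) (layer_count : Int) (out : List (Int × Int)) : Decidable (Spec_build_layer_ranges_now node_count layer_count out) := by unfold Spec_build_layer_ranges_now; infer_instance

-- ===== CLAIM (what is proved, stated in full; the proofs are below) =====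
def Claim_equal_build_layer_ranges_now : Prop := ∀ (node_count : Int) (layer_count : Int), Dom_build_layer_ranges_now node_count layer_count → Pre_build_layer_ranges_now node_count layer_count → Spec_build_layer_ranges_now node_count layer_count (build_layer_ranges_now node_count layer_count)

-- ===== LEMMAS AND PROOFS =====

-- loop invariant: after folding over range(0, m), the accumulator is the closed-form map
-- and next_start equals m*base + min m rem
lemma blr_loop_eq (base rem : Int) (hrem : 0 ≤ rem) : ∀ (m : Nat),
    ((PySem.List.pyRange 0 (m : Int) 1).foldl
      (fun (st : List (Int × Int) × Int) layer_index =>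
        let layer_size := base + (if layer_index < rem then (1:Int) else 0)
        let next_end := st.2 + layer_size
        (st.1 ++ [(st.2, next_end)], next_end))
      ([], 0))
    = ((PySem.List.pyRange 0 (m : Int) 1).map (fun i =>
        (i * base + min i rem, (i + 1) * base + min (i + 1) rem)),
       (m : Int) * base + min (m : Int) rem) := by
  intro m
  induction m with
  | zero => simp [PySem.List.pyRange_one_eq_nil]; omega
  | succ k ih =>
    have h0 : (0 : Int) ≤ (k : Int) := by exact_mod_cast Nat.zero_le k
    have hsplit : PySem.List.pyRange 0 ((k : Int) + 1) 1
        = PySem.List.pyRange 0 (k : Int) 1 ++ [(k : Int)] :=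
      PySem.List.pyRange_one_succ_right h0
    push_cast
    rw [hsplit, List.foldl_append, List.map_append, ih]
    simp only [List.foldl_cons, List.foldl_nil, List.map_cons, List.map_nil]
    have E : (k : Int) * base + min (k : Int) rem + (base + if (k : Int) < rem then (1:Int) else 0)
        = ((k : Int) + 1) * base + min ((k : Int) + 1) rem := by
      split_ifs with h
      · have h1 : min (k : Int) rem = (k : Int) := by omega
        have h2 : min ((k : Int) + 1) rem = (k : Int) + 1 := by omega
        rw [h1, h2]; ring
      · have h1 : min (k : Int) rem = rem := by omega
        have h2 : min ((k : Int) + 1) rem = rem := by omega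
        rw [h1, h2]; ring
    rw [E]
-- ===== VERDICT (by name: the statement is the Claim_ definition above) =====
theorem build_layer_ranges_now_spec : Claim_equal_build_layer_ranges_now := by
  intro n l _ hpre
  obtain ⟨hn, hl⟩ := hpre
  show build_layer_ranges_now n l = build_layer_ranges_now_alt n l
  unfold build_layer_ranges_now build_layer_ranges_now_alt
  rw [if_neg (by omega), if_neg (by omega), if_neg (by omega), if_neg (by omega)]
  have hlc : (0 : Int) ≤ min l n := by omega
  obtain ⟨m, hm⟩ := Int.eq_ofNat_of_zero_le hlc
  simp only [hm]
  rw [blr_loop_eq _ _ (PySem.Int.mod_nonneg _ (by omega))]
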